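-- pv_equiv track=rewrite | github.com/ckoons/BubbleSpacetimeTheory | play/toy_410_todd_class_bridge.py | perfect_square_genera
-- ===== SOURCE A (Python) =====
-- import math
--
-- def heawood(g):
--     """Heawood number: max chromatic number of a surface of genus g.
--     H(g) = ⌊(7 + √(1 + 48g))/2⌋ for g ≥ 1."""
--     if g == 0:
--         return 4  # Four color theorem
--     return int((7 + math.sqrt(1 + 48 * g)) / 2)
--
-- def perfect_square_genera(max_k=100):
--     """Find genera g where 1 + 48g is a perfect square k².
--     These are the genera where the Heawood bound is tight."""
--     results = []
--     for k in range(1, max_k):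
--         if (k * k - 1) % 48 == 0:
--             g = (k * k - 1) // 48
--             h = heawood(g) if g > 0 else 4
--             results.append((k, g, h))
--     return results
-- ===== SOURCE B (Python) =====
-- def perfect_square_genera(max_k=100):
--     """Find genera g where 1 + 48g is a perfect square k^2.
--     k*k == 1 (mod 48) exactly when k == 1, 7, 17 or 23 (mod 24), so emit
--     those residues directly, block by block, and compute the Heawood
--     number arithmetically as (7 + k) // 2 (exact, since 1 + 48g = k^2)."""
--     results = []
--     for q in range((max_k + 22) // 24):
--         for r in (1, 7, 17, 23):
--             k = 24 * q + r
--             if k < max_k: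
--                 results.append((k, (k * k - 1) // 48, (7 + k) // 2))
--     return results
-- ===== Notes on version B (the rewrite author's own statement) =====
-- stated objective: faster
-- what changed: Instead of scanning every k in range(1, max_k) and testing (k*k-1) % 48 == 0 (calling a float-sqrt heawood on hits), B emits the qualifying k directly as the four residues 1, 7, 17, 23 of each 24-block and computes the Heawood number arithmetically as (7 + k) // 2.
import Mathlib
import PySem

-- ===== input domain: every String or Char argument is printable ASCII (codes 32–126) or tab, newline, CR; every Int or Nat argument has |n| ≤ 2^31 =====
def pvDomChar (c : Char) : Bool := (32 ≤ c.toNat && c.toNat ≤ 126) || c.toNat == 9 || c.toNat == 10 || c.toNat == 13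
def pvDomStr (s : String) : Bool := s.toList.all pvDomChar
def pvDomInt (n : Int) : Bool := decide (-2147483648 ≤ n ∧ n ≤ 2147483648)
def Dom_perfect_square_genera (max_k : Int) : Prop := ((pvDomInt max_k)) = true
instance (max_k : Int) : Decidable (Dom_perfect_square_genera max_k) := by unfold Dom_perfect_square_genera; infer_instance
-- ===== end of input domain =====

-- B replaces A's modular test over every k (plus a float sqrt in heawood) by emitting the four
-- residues 1, 7, 17, 23 of each 24-block directly; objective: faster (constant factor).

-- ===== PORT A =====
-- math.sqrt ported as the exact integer square root: within perfect_square_genera every call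
-- receives 1 + 48*g = k*k, a perfect square with k ≤ 2^31, where Python's float sqrt is exact.
def pySqrtPS (n : Int) : Int := ((Int.toNat n).sqrt : Int)

-- int((7 + sqrt(1+48g)) / 2): the sum is a nonnegative integer, halving is exact in float and
-- int() truncation = floor there, so this is floordiv by 2.
def heawood (g : Int) : Int :=
  if g == 0 then 4
  else PySem.Int.floordiv (7 + pySqrtPS (1 + 48 * g)) 2

def perfect_square_genera (max_k : Int) : List (Int × Int × Int) :=
  (PySem.List.pyRange 1 max_k 1).foldl (fun results k =>
    if PySem.Int.mod (k * k - 1) 48 == 0 then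
      let g := PySem.Int.floordiv (k * k - 1) 48
      let h := if g > 0 then heawood g else 4
      results ++ [(k, g, h)]
    else results) []

-- ===== PORT B =====
def perfect_square_genera_alt (max_k : Int) : List (Int × Int × Int) :=
  (PySem.List.pyRange 0 (PySem.Int.floordiv (max_k + 22) 24) 1).foldl
    (fun results q =>
      ([(1 : Int), 7, 17, 23]).foldl (fun res r =>
        let k := 24 * q + r
        if k < max_k then
          res ++ [(k, PySem.Int.floordiv (k * k - 1) 48, PySem.Int.floordiv (7 + k) 2)]
        else res) results) []

-- ===== PRECONDITION & SPEC =====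
def Spec_perfect_square_genera (max_k : Int) (out : List (Int × Int × Int)) : Prop := out = perfect_square_genera_alt max_k
instance (max_k : Int) (out : List (Int × Int × Int)) : Decidable (Spec_perfect_square_genera max_k out) := by unfold Spec_perfect_square_genera; infer_instance

-- ===== CLAIM (what is proved, stated in full; the proofs are below) =====
def Claim_equal_perfect_square_genera : Prop := ∀ (max_k : Int), Dom_perfect_square_genera max_k → Spec_perfect_square_genera max_k (perfect_square_genera max_k)

-- ===== LEMMAS AND PROOFS =====

-- A's loop test and payload
def pvPA (k : Int) : Bool := PySem.Int.mod (k * k - 1) 48 == 0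
def pvFA (k : Int) : Int × Int × Int :=
  (k, PySem.Int.floordiv (k * k - 1) 48,
    if PySem.Int.floordiv (k * k - 1) 48 > 0 then heawood (PySem.Int.floordiv (k * k - 1) 48) else 4)
-- B's payload
def pvFB (k : Int) : Int × Int × Int :=
  (k, PySem.Int.floordiv (k * k - 1) 48, PySem.Int.floordiv (7 + k) 2)
-- the candidate k's of B's q-th block
def pvKBlock (max_k q : Int) : List Int :=
  (([(1 : Int), 7, 17, 23]).filter (fun r => decide (24 * q + r < max_k))).map (fun r => 24 * q + r)

theorem pvLA_char (m : Int) :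
    perfect_square_genera m = ((PySem.List.pyRange 1 m 1).filter pvPA).map pvFA := by
  have h := PySem.List.foldl_append_if pvPA pvFA (PySem.List.pyRange 1 m 1) []
  simpa using h

theorem pvLB_char (m : Int) :
    perfect_square_genera_alt m =
      (PySem.List.pyRange 0 (PySem.Int.floordiv (m + 22) 24) 1).flatMap
        (fun q => (pvKBlock m q).map pvFB) := by
  unfold perfect_square_genera_alt
  have hinner : ∀ (res : List (Int × Int × Int)) (q : Int),
      ([(1 : Int), 7, 17, 23]).foldl (fun res r =>
        let k := 24 * q + r
        if k < m then
          res ++ [(k, PySem.Int.floordiv (k * k - 1) 48, PySem.Int.floordiv (7 + k) 2)]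
        else res) res = res ++ (pvKBlock m q).map pvFB := by
    intro res q
    have hf : (fun (res : List (Int × Int × Int)) r =>
        let k := 24 * q + r
        if k < m then
          res ++ [(k, PySem.Int.floordiv (k * k - 1) 48, PySem.Int.floordiv (7 + k) 2)]
        else res) = (fun res r =>
        if (fun r => decide (24 * q + r < m)) r = true then
          res ++ [(fun r => pvFB (24 * q + r)) r] else res) := by
      funext res r
      by_cases h : 24 * q + r < m <;> simp [h, pvFB]
    rw [hf, PySem.List.foldl_append_if]
    unfold pvKBlock
    rw [List.map_map]
    rfl
  have hout : (fun (results : List (Int × Int × Int)) q =>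
      ([(1 : Int), 7, 17, 23]).foldl (fun res r =>
        let k := 24 * q + r
        if k < m then
          res ++ [(k, PySem.Int.floordiv (k * k - 1) 48, PySem.Int.floordiv (7 + k) 2)]
        else res) results) = fun results q => results ++ (pvKBlock m q).map pvFB := by
    funext results q; exact hinner results q
  rw [hout, PySem.List.foldl_append_eq_flatMap]
  simp

theorem pvFA_eq_FB (k : Int) (h1 : 1 ≤ k) (h2 : (48 : Int) ∣ k * k - 1) : pvFA k = pvFB k := by
  obtain ⟨c, hc⟩ := h2
  have hg : PySem.Int.floordiv (k * k - 1) 48 = c := by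
    rw [PySem.Int.floordiv_eq_ediv_of_pos (by norm_num), hc, Int.mul_ediv_cancel_left _ (by norm_num)]
  unfold pvFA pvFB
  rw [hg]
  refine Prod.ext rfl (Prod.ext rfl ?_)
  by_cases hc0 : c > 0
  · simp only [hc0, if_true]
    unfold heawood
    have : (c == 0) = false := by simp; omega
    rw [this]
    simp only [Bool.false_eq_true, if_false]
    have hk2 : 1 + 48 * c = k * k := by omega
    have hsq : pySqrtPS (1 + 48 * c) = k := by
      unfold pySqrtPS
      rw [hk2]
      have hkn : k * k = ((k.toNat * k.toNat : Nat) : Int) := by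
        push_cast [Int.toNat_of_nonneg (by omega : (0:Int) ≤ k)]; ring
      rw [hkn, Int.toNat_natCast, ← Nat.pow_two, Nat.sqrt_eq', Int.toNat_of_nonneg (by omega)]
    rw [hsq]
  · have hc0' : c = 0 := by nlinarith [sq_nonneg (k - 1), sq_nonneg k]
    have hk1 : k = 1 := by nlinarith [sq_nonneg (k - 1)]
    subst hk1 hc0'
    decide

theorem pv_mem_kBlock {m q x : Int} (h : x ∈ pvKBlock m q) :
    24 * q + 1 ≤ x ∧ x ≤ 24 * q + 23 ∧ x < m := by
  simp only [pvKBlock, List.mem_map, List.mem_filter, List.mem_cons, List.not_mem_nil,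
    or_false, decide_eq_true_eq] at h
  obtain ⟨r, ⟨hr, hlt⟩, rfl⟩ := h
  rcases hr with rfl | rfl | rfl | rfl <;> omega

theorem pv_mem_iff (m x : Int) :
    x ∈ (PySem.List.pyRange 1 m 1).filter pvPA ↔
      x ∈ (PySem.List.pyRange 0 (PySem.Int.floordiv (m + 22) 24) 1).flatMap (pvKBlock m) := by
  rw [PySem.Int.floordiv_eq_ediv_of_pos (by norm_num)]
  simp only [List.mem_filter, List.mem_flatMap, PySem.List.mem_pyRange_one, pvPA, beq_iff_eq,
    PySem.Int.mod_eq_zero_iff_dvd, pvKBlock, List.mem_map, List.mem_filter, List.mem_cons,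
    List.not_mem_nil, or_false, decide_eq_true_eq]
  constructor
  · rintro ⟨⟨h1, h2⟩, hd⟩
    set q := x / 24 with hq
    set r := x % 24 with hr
    have hx : x = 24 * q + r := by omega
    have hr0 : 0 ≤ r := by omega
    have hr24 : r < 24 := by omega
    have hd' : (48 : Int) ∣ r * r - 1 := by
      have heq : r * r - 1 = (x * x - 1) - 48 * (12 * q * q + q * r) := by rw [hx]; ring
      rw [heq]
      exact dvd_sub hd (Dvd.intro _ rfl)
    have hrmem : r = 1 ∨ r = 7 ∨ r = 17 ∨ r = 23 := by
      interval_cases r <;> omega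
    exact ⟨q, ⟨by omega, by omega⟩, r, ⟨hrmem, by omega⟩, by omega⟩
  · rintro ⟨q, ⟨hq0, hqQ⟩, r, ⟨hrmem, hlt⟩, rfl⟩
    refine ⟨⟨by omega, hlt⟩, ?_⟩
    rcases hrmem with rfl | rfl | rfl | rfl
    · exact ⟨12 * q * q + q, by ring⟩
    · exact ⟨12 * q * q + 7 * q + 1, by ring⟩
    · exact ⟨12 * q * q + 17 * q + 6, by ring⟩
    · exact ⟨12 * q * q + 23 * q + 11, by ring⟩

theorem pv_ks_eq (m : Int) :
    (PySem.List.pyRange 1 m 1).filter pvPA =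
      (PySem.List.pyRange 0 (PySem.Int.floordiv (m + 22) 24) 1).flatMap (pvKBlock m) := by
  have hp1 : ((PySem.List.pyRange 1 m 1).filter pvPA).Pairwise (· < ·) :=
    (PySem.List.pairwise_lt_pyRange_one 1 m).filter _
  have hp2 : ((PySem.List.pyRange 0 (PySem.Int.floordiv (m + 22) 24) 1).flatMap (pvKBlock m)).Pairwise (· < ·) := by
    rw [List.pairwise_flatMap]
    constructor
    · intro q _
      unfold pvKBlock
      refine List.Pairwise.map _ (fun a b h => by omega) ?_
      exact List.Pairwise.filter _ ((show List.Pairwise (· < ·) [(1:Int),7,17,23] by decide).imp (fun h => by omega))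
    · refine (PySem.List.pairwise_lt_pyRange_one 0 _).imp ?_
      intro q q' hqq x hx y hy
      have h1 := pv_mem_kBlock hx
      have h2 := pv_mem_kBlock hy
      omega
  have hperm : ((PySem.List.pyRange 1 m 1).filter pvPA).Perm
      ((PySem.List.pyRange 0 (PySem.Int.floordiv (m + 22) 24) 1).flatMap (pvKBlock m)) := by
    rw [List.perm_ext_iff_of_nodup (hp1.imp fun h => by omega) (hp2.imp fun h => by omega)]
    exact pv_mem_iff m
  exact hperm.eq_of_pairwise (fun a b _ _ h1 h2 => by omega) hp1 hp2

-- ===== VERDICT (by name: the statement is the Claim_ definition above) =====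
theorem perfect_square_genera_spec : Claim_equal_perfect_square_genera := by
  intro m _
  unfold Spec_perfect_square_genera
  rw [pvLA_char, pvLB_char, ← List.map_flatMap, ← pv_ks_eq]
  refine List.map_congr_left ?_
  intro k hk
  rw [List.mem_filter] at hk
  have h1 : 1 ≤ k := (PySem.List.mem_pyRange_one.mp hk.1).1
  have h2 : (48 : Int) ∣ k * k - 1 := by
    have := hk.2
    simp only [pvPA, beq_iff_eq] at this
    exact (PySem.Int.mod_eq_zero_iff_dvd _ _).mp this
  exact pvFA_eq_FB k h1 h2
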